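-- pv_equiv track=rewrite | github.com/deshima-dev/kidanalysis-delft | scripts/libs/mkid_data/peak_search.py | count_indices_cluster
-- ===== SOURCE A (Python) =====
-- def count_indices_cluster(indices, target=True):
--     """
--     count `target` in `indices`, but contiguous `target` is counted once.
--
--     :param indices: an 1-D array
--     :param target: an scalar to search in `indices`
--     """
--     count = 0
--     prev  = indices[0]
--     if prev == target:
--         count += 1
--
--     first = True
--     for x in indices:
--         if x == target and prev != target:
--             count += 1
--         prev = x
--     return count
-- ===== SOURCE B (Python) =====
-- def count_indices_cluster(indices, target=True):
--     """Run-length collapse the array (keep one element per run), then count target among run heads."""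
--     runs = []
--     for x in indices:
--         if not runs or runs[-1] != x:
--             runs.append(x)
--     return runs.count(target)
-- ===== Notes on version B (the rewrite author's own statement) =====
-- stated objective: alternative
-- what changed: Instead of A's online counter with prev-tracking and a head special-case, B materializes the run-length-collapsed list (one representative per contiguous run) and returns list.count(target) on it.
import Mathlib
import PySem

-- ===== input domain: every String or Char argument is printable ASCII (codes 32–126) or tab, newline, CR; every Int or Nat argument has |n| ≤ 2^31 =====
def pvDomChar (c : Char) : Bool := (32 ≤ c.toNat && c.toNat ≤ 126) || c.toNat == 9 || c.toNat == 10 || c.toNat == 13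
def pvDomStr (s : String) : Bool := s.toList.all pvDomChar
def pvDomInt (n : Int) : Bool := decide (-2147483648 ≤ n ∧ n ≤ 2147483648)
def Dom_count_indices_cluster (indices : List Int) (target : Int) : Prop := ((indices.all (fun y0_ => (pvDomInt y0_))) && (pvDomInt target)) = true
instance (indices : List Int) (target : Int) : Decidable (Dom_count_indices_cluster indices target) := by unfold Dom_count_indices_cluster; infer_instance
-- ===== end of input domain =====

-- B run-length-collapses the list and counts target among the run heads, instead of A's online prev-tracking counter (alternative, same cost).

-- ===== PORT A =====
-- prev = indices[0] raises IndexError on empty input; Pre_ excludes it (the 'none' branch is unreachable under Pre_).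
def count_indices_cluster (indices : List Int) (target : Int) : Int :=
  match PySem.List.pyGet? indices 0 with
  | none => 0
  | some prev0 =>
    let count : Int := if prev0 = target then 1 else 0
    (indices.foldl
      (fun (s : Int × Int) x =>
        (if x = target ∧ s.2 ≠ target then s.1 + 1 else s.1, x))
      (count, prev0)).1

-- ===== PORT B =====
-- runs = []; for x: if not runs or runs[-1] != x: runs.append(x); return runs.count(target)
def count_indices_cluster_alt (indices : List Int) (target : Int) : Int :=
  let runs := indices.foldl
    (fun (runs : List Int) x =>
      if runs = [] ∨ PySem.List.pyGet? runs (-1) ≠ some x then runs ++ [x] else runs) []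
  (runs.count target : Int)

-- ===== PRECONDITION & SPEC =====
-- A evaluates indices[0], which raises IndexError on the empty list; B returns 0 there (see Raises_).
def Pre_count_indices_cluster (indices : List Int) (target : Int) : Prop := indices ≠ []
instance (indices : List Int) (target : Int) : Decidable (Pre_count_indices_cluster indices target) := by unfold Pre_count_indices_cluster; infer_instance
def pvWitness_count_indices_cluster : List Int × Int := ([1, 1, 0, 1], 1)

def Spec_count_indices_cluster (indices : List Int) (target : Int) (out : Int) : Prop := out = count_indices_cluster_alt indices target
instance (indices : List Int) (target : Int) (out : Int) : Decidable (Spec_count_indices_cluster indices target out) := by unfold Spec_count_indices_cluster; infer_instance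

-- ===== CLAIM (what is proved, stated in full; the proofs are below) =====
def Claim_equal_count_indices_cluster : Prop := ∀ (indices : List Int) (target : Int), Dom_count_indices_cluster indices target → Pre_count_indices_cluster indices target → Spec_count_indices_cluster indices target (count_indices_cluster indices target)

-- ===== LEMMAS AND PROOFS =====

-- number of positions with value = target whose predecessor (chain starting at p) ≠ target
def pvEdges (target : Int) : Int → List Int → Int
  | _, [] => 0
  | p, x :: xs => (if x = target ∧ p ≠ target then 1 else 0) + pvEdges target x xs

-- one representative per contiguous run of the chain p :: xs (p's own run contributes nothing)
def pvDedup (p : Int) : List Int → List Int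
  | [] => []
  | x :: xs => (if x = p then [] else [x]) ++ pvDedup x xs

theorem foldA_eq_edges (target : Int) (xs : List Int) :
    ∀ (c p : Int),
      (xs.foldl (fun (s : Int × Int) x =>
          (if x = target ∧ s.2 ≠ target then s.1 + 1 else s.1, x)) (c, p)).1
        = c + pvEdges target p xs := by
  induction xs with
  | nil => intro c p; simp [pvEdges]
  | cons x xs ih =>
    intro c p
    simp only [List.foldl, pvEdges]
    rw [ih]
    split_ifs <;> ring

theorem foldB_eq_dedup (xs : List Int) :
    ∀ (acc : List Int) (p : Int), acc.getLast? = some p →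
      xs.foldl (fun (runs : List Int) x =>
          if runs = [] ∨ PySem.List.pyGet? runs (-1) ≠ some x then runs ++ [x] else runs) acc
        = acc ++ pvDedup p xs := by
  induction xs with
  | nil => intro acc p _; simp [pvDedup]
  | cons x xs ih =>
    intro acc p hlast
    have hne : acc ≠ [] := by intro h; simp [h] at hlast
    simp only [List.foldl, pvDedup]
    by_cases hx : x = p
    · have hstep : (if acc = [] ∨ PySem.List.pyGet? acc (-1) ≠ some x then acc ++ [x] else acc) = acc := by
        rw [if_neg]
        push_neg
        exact ⟨hne, by rw [PySem.List.pyGet?_neg_one, hlast, hx]⟩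
      rw [hstep, ih acc p hlast]; simp [hx]
    · have hstep : (if acc = [] ∨ PySem.List.pyGet? acc (-1) ≠ some x then acc ++ [x] else acc) = acc ++ [x] := by
        rw [if_pos]
        exact Or.inr (by rw [PySem.List.pyGet?_neg_one, hlast]; simpa using fun h => hx h.symm)
      rw [hstep, ih (acc ++ [x]) x (by simp)]
      simp [hx]

theorem count_dedup_eq_edges (target : Int) (xs : List Int) :
    ∀ (p : Int), ((pvDedup p xs).count target : Int) = pvEdges target p xs := by
  induction xs with
  | nil => intro p; simp [pvDedup, pvEdges]
  | cons x xs ih =>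
    intro p
    simp only [pvDedup, pvEdges]
    rw [← ih x]
    by_cases hx : x = target <;> by_cases hp : p = target <;> by_cases hxp : x = p <;>
      simp_all [List.count_append, List.count_cons] <;> omega

-- ===== VERDICT (by name: the statement is the Claim_ definition above) =====
theorem count_indices_cluster_spec : Claim_equal_count_indices_cluster := by
  intro indices target _ hpre
  cases indices with
  | nil => exact absurd rfl hpre
  | cons x xs =>
    show _ = _
    unfold count_indices_cluster count_indices_cluster_alt
    rw [PySem.List.pyGet?_zero_cons]
    show (List.foldl _ (_, x) (x :: xs)).1 = _
    rw [foldA_eq_edges]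
    show _ = ((List.foldl _ [] (x :: xs)).count target : Int)
    have h1 : List.foldl (fun (runs : List Int) x =>
        if runs = [] ∨ PySem.List.pyGet? runs (-1) ≠ some x then runs ++ [x] else runs) [] (x :: xs)
        = [x] ++ pvDedup x xs := by
      simp only [List.foldl]
      have hstep : (if True ∨ PySem.List.pyGet? ([] : List Int) (-1) ≠ some x
            then ([] : List Int) ++ [x] else []) = [x] := by simp
      rw [hstep]
      exact foldB_eq_dedup xs [x] x (by simp)
    rw [h1]
    simp only [List.count_append, List.count_cons, List.count_nil, pvEdges]
    push_cast
    rw [← count_dedup_eq_edges target xs x]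
    by_cases hx : x = target <;> simp [hx] <;> omega
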